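-- pv_equiv track=rewrite | github.com/slobdell/pycon_blimp | autopilot/blimp.py | _get_distance_right
-- ===== SOURCE A (Python) =====
-- def _get_distance_right(current, target):
--     current = int(current)
--     target = int(target)
--     degrees_ticked = 0
--     while current != target:
--         current += 1
--         degrees_ticked += 1
--         if current >= 360:
--             current -= 360
--         elif current < 0:
--             current += 360
--     return degrees_ticked
-- ===== SOURCE B (Python) =====
-- def _get_distance_right(current, target):
--     return (int(target) - int(current)) % 360
-- ===== Notes on version B (the rewrite author's own statement) =====
-- stated objective: simpler
-- what changed: Replaces the one-degree-at-a-time tick loop with the closed form (target - current) % 360; Pre_ restricts both angles to the compass domain [0,360), outside which A diverges for almost every target and, for out-of-range current, returns a tick count inflated by its per-step wrap handling (an implementation artefact).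
-- outside the precondition, e.g. on _get_distance_right(1000, 280): A returns 360, B returns 0; on _get_distance_right(1000, 5): A returns 85, B returns 85; on _get_distance_right(0, 400): A does not finish within the time limit, B returns 40
import Mathlib
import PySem

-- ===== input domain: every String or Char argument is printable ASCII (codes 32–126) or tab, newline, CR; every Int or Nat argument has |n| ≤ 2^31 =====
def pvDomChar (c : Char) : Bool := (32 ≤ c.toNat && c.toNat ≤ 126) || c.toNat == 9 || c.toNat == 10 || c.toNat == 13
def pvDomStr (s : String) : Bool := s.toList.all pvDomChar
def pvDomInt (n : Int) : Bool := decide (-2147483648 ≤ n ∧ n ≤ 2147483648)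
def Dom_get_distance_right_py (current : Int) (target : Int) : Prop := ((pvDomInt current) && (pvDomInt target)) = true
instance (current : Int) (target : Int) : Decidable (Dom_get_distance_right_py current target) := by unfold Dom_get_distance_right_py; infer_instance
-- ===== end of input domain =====

-- B replaces A's one-degree-at-a-time tick loop by the closed form (target - current) % 360,
-- on the compass-degree domain [0, 360) stated by Pre_.

-- ===== PORT A =====
-- A's while-loop, made total with fuel; with fuel larger than the number of steps
-- the loop takes, this is exactly A's loop.
def pyLoopA (target : Int) : Nat → Int → Int → Int
  | 0, _, acc => acc
  | fuel+1, cur, acc =>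
      if cur = target then acc
      else
        let c1 := cur + 1
        let c2 := if c1 ≥ 360 then c1 - 360 else if c1 < 0 then c1 + 360 else c1
        pyLoopA target fuel c2 (acc + 1)

def get_distance_right_py (current : Int) (target : Int) : Int :=
  pyLoopA target (current.natAbs + 721) current 0

-- ===== PORT B =====
def get_distance_right_py_alt (current : Int) (target : Int) : Int :=
  PySem.Int.mod (target - current) 360

-- ===== PRECONDITION & SPEC =====
-- Pre_ restricts both angles to the natural compass-degree domain [0,360): for target
-- outside it A's loop diverges for almost every current, and for current outside it A's
-- returned tick count is inflated by its per-step wrap handling, an implementation artefact.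
def Pre_get_distance_right_py (current : Int) (target : Int) : Prop :=
  0 ≤ current ∧ current < 360 ∧ 0 ≤ target ∧ target < 360
instance (current : Int) (target : Int) : Decidable (Pre_get_distance_right_py current target) := by unfold Pre_get_distance_right_py; infer_instance

def pvWitness_get_distance_right_py : Int × Int := (350, 5)

def Spec_get_distance_right_py (current : Int) (target : Int) (out : Int) : Prop := out = get_distance_right_py_alt current target
instance (current : Int) (target : Int) (out : Int) : Decidable (Spec_get_distance_right_py current target out) := by unfold Spec_get_distance_right_py; infer_instance

-- ===== CLAIM =====
def Claim_equal_get_distance_right_py : Prop := ∀ (current : Int) (target : Int), Dom_get_distance_right_py current target → Pre_get_distance_right_py current target → Spec_get_distance_right_py current target (get_distance_right_py current target)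

-- ===== LEMMAS AND PROOFS =====

-- Inside [0,360) the loop walks one degree per tick: it takes (t - c) % 360 steps.
lemma pyLoopA_inrange : ∀ (fuel : Nat) (t c acc : Int), 0 ≤ t → t < 360 → 0 ≤ c → c < 360 →
    (t - c) % 360 < (fuel : Int) → pyLoopA t fuel c acc = acc + (t - c) % 360 := by
  intro fuel
  induction fuel with
  | zero => intro t c acc h1 h2 h3 h4 h5; exfalso; omega
  | succ n ih =>
    intro t c acc h1 h2 h3 h4 h5
    by_cases hct : c = t
    · subst hct; simp [pyLoopA]
    · have hstep : pyLoopA t (n+1) c acc =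
          pyLoopA t n (if c + 1 ≥ 360 then c + 1 - 360 else if c + 1 < 0 then c + 1 + 360 else c + 1) (acc + 1) := by
        simp [pyLoopA, hct]
      rw [hstep]
      by_cases h359 : c = 359
      · subst h359
        have : (if (359:Int) + 1 ≥ 360 then (359:Int) + 1 - 360 else if (359:Int) + 1 < 0 then 359 + 1 + 360 else 359 + 1) = 0 := by norm_num
        rw [this, ih t 0 (acc+1) h1 h2 (by omega) (by omega) (by omega)]
        omega
      · have : (if c + 1 ≥ 360 then c + 1 - 360 else if c + 1 < 0 then c + 1 + 360 else c + 1) = c + 1 := by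
          split_ifs <;> omega
        rw [this, ih t (c+1) (acc+1) h1 h2 (by omega) (by omega) (by omega)]
        omega

-- ===== VERDICT =====
theorem get_distance_right_py_spec : Claim_equal_get_distance_right_py := by
  intro c t _hdom hpre
  obtain ⟨h1, h2, h3, h4⟩ := hpre
  have hmod : PySem.Int.mod (t - c) 360 = (t - c) % 360 :=
    PySem.Int.mod_eq_emod_of_pos (by omega)
  simp only [Spec_get_distance_right_py, get_distance_right_py, get_distance_right_py_alt, hmod]
  rw [pyLoopA_inrange (c.natAbs + 721) t c 0 h3 h4 h1 h2 (by omega)]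
  omega
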